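-- pv_equiv track=rewrite | github.com/Jair33190Jair/ai_reqs_analyzer | pipeline_root/src/S1_normalizer.py | _find_repeated_lines
-- ===== SOURCE A (Python) =====
-- from collections import Counter
--
-- def _find_repeated_lines(pages: list[dict], threshold: int = 3) -> set[str]:
--     """Return stripped lines that appear on `threshold` or more distinct pages."""
--     """s_ln = stripped line"""
--     pages_line_list = [
--         {s_ln for ln in p["text"].split('\n') if (s_ln:=ln.strip())}
--         for p in pages
--     ]
--     counter: Counter = Counter()
--     for page_line in pages_line_list:
--         for ln in page_line:
--             counter[ln] += 1
--     return {ln for ln, n in counter.items() if n >= threshold}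
-- ===== SOURCE B (Python) =====
-- def _find_repeated_lines(pages: list[dict], threshold: int = 3) -> set[str]:
--     """Return stripped lines that appear on `threshold` or more distinct pages.
--
--     Two-stage brute force without any hashing/counting structure: first build a
--     deduplicated candidate list of all stripped non-empty lines (first-occurrence
--     order), then for each candidate count by direct membership scans how many
--     pages contain it.
--     """
--     stripped = [[s for ln in p["text"].split('\n') if (s := ln.strip())] for p in pages]
--     candidates: list[str] = []
--     for lines in stripped:
--         for s in lines:
--             if s not in candidates:
--                 candidates.append(s)
--     return {c for c in candidates
--             if sum(1 for lines in stripped if c in lines) >= threshold}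
-- ===== Notes on version B (the rewrite author's own statement) =====
-- stated objective: alternative
-- what changed: Replaces A's hash-based accumulation (per-page set comprehensions fed into a Counter) by a candidate-driven brute force: a deduplicated candidate list of all stripped lines is built first, then each candidate's page count is obtained by a direct membership scan over the per-page line lists -- no Counter, no sets, a nested-scan algorithm instead of a hashed single accumulation.
import Mathlib
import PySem

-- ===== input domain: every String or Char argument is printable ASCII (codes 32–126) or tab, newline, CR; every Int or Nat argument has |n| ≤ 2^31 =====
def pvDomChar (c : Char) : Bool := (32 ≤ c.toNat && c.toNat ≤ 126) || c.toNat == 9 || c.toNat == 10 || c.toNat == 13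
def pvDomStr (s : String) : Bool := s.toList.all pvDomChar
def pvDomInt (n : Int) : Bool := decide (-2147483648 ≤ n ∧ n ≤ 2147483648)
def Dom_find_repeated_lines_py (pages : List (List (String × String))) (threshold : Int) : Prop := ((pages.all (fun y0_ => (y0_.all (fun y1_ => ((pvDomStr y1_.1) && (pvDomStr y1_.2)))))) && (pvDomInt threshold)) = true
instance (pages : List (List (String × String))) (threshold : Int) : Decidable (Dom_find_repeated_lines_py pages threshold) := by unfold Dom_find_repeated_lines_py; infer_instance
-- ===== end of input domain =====

-- B replaces A's hash accumulation (per-page sets fed into a Counter) by a candidate-driven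
-- brute force: a deduplicated candidate list of all stripped lines, then per-candidate page
-- counts by direct membership scans (objective: alternative, no speed claim).

-- shared helper: p["text"].split('\n') (both Pythons evaluate exactly this; the KeyError
-- case — no "text" key — is excluded by Pre_ below, the port reads "" there)
def pvRawLines (p : List (String × String)) : List String :=
  (PySem.Str.split? (((PySem.Dict.mk p).get? "text").getD "") "\n").getD []

-- ===== PORT A =====
def find_repeated_lines_py (pages : List (List (String × String))) (threshold : Int) : List String :=
  let pages_line_list : List (PySem.Set String) :=
    pages.map (fun p =>
      PySem.Set.ofList (((pvRawLines p).map PySem.Str.strip).filter (fun s => s != "")))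
  let counter : PySem.Dict String Int :=
    pages_line_list.foldl (fun c page_line =>
      page_line.foldl (fun c ln => c.modify ln 0 (· + 1)) c) PySem.Dict.empty
  PySem.Set.ofList ((counter.items.filter (fun q => decide (threshold ≤ q.2))).map (·.1))

-- ===== PORT B =====
def find_repeated_lines_py_alt (pages : List (List (String × String))) (threshold : Int) : List String :=
  let stripped : List (List String) :=
    pages.map (fun p => ((pvRawLines p).map PySem.Str.strip).filter (fun s => s != ""))
  let candidates : List String :=
    stripped.foldl (fun acc lines =>
      lines.foldl (fun acc s => if s ∈ acc then acc else acc ++ [s]) acc) []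
  PySem.Set.ofList (candidates.filter (fun c =>
    decide (threshold ≤ stripped.foldl (fun n lines => if c ∈ lines then n + 1 else n) (0 : Int))))

-- ===== PRECONDITION & SPEC =====
-- Pre_ excludes exactly the pages without a "text" key, on which the Python A raises KeyError (B raises there too).
def Pre_find_repeated_lines_py (pages : List (List (String × String))) (threshold : Int) : Prop :=
  ∀ p ∈ pages, ((PySem.Dict.mk p).get? "text").isSome = true
instance (pages : List (List (String × String))) (threshold : Int) : Decidable (Pre_find_repeated_lines_py pages threshold) := by unfold Pre_find_repeated_lines_py; infer_instance
def pvWitness_find_repeated_lines_py : (List (List (String × String))) × Int :=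
  ([[("text", "alpha\n  beta ")], [("text", "beta")]], 1)

def Spec_find_repeated_lines_py (pages : List (List (String × String))) (threshold : Int) (out : List String) : Prop := out = find_repeated_lines_py_alt pages threshold
instance (pages : List (List (String × String))) (threshold : Int) (out : List String) : Decidable (Spec_find_repeated_lines_py pages threshold out) := by unfold Spec_find_repeated_lines_py; infer_instance

-- ===== CLAIM (what is proved, stated in full; the proofs are below) =====
def Claim_equal_find_repeated_lines_py : Prop := ∀ (pages : List (List (String × String))) (threshold : Int), Dom_find_repeated_lines_py pages threshold → Pre_find_repeated_lines_py pages threshold → Spec_find_repeated_lines_py pages threshold (find_repeated_lines_py pages threshold)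

-- ===== LEMMAS AND PROOFS =====

def pvLL (p : List (String × String)) : List String :=
  ((pvRawLines p).map PySem.Str.strip).filter (fun s => s != "")

-- A's counter value at v counts the pages whose line set contains v
theorem pv_A_getD (sets : List (PySem.Set String)) (c : PySem.Dict String Int) (v : String)
    (hn : ∀ s ∈ sets, s.Nodup) :
    ((sets.foldl (fun c pl => pl.foldl (fun c ln => c.modify ln 0 (· + 1)) c) c).getD v 0)
      = c.getD v 0 + (sets.countP (fun s => decide (v ∈ s)) : Int) := by
  induction sets generalizing c with
  | nil => simp
  | cons s t ih =>
    simp only [List.foldl_cons]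
    rw [ih _ (fun s hs => hn s (List.mem_cons_of_mem _ hs)),
        PySem.Dict.getD_foldl_modify_add_one]
    have hns : s.Nodup := hn s (List.mem_cons_self ..)
    by_cases hv : v ∈ s
    · rw [List.count_eq_one_of_mem hns hv]
      simp [hv]; omega
    · rw [List.count_eq_zero_of_not_mem hv]
      simp [hv]

theorem pv_update_add (s u : PySem.Set String) (a : String) :
    PySem.Set.update s (u.add a) = (PySem.Set.update s u).add a := by
  by_cases h : a ∈ u
  · have h1 : u.add a = u := by simp [PySem.Set.add, PySem.Set.contains, h]
    have h2 : a ∈ PySem.Set.update s u := by rw [PySem.Set.mem_update]; exact Or.inr h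
    rw [h1, show (PySem.Set.update s u).add a = PySem.Set.update s u by
      simp [PySem.Set.add, PySem.Set.contains, h2]]
  · have h1 : u.add a = u ++ [a] := by simp [PySem.Set.add, PySem.Set.contains, h]
    rw [h1]
    show List.foldl PySem.Set.add s (u ++ [a]) = _
    rw [List.foldl_append]
    rfl

theorem pv_update_update (l : List String) (u s : PySem.Set String) :
    PySem.Set.update s (PySem.Set.update u l) = PySem.Set.update (PySem.Set.update s u) l := by
  induction l generalizing u s with
  | nil => simp [PySem.Set.update_nil]
  | cons a t ih =>
    have h1 : PySem.Set.update u (a :: t) = PySem.Set.update (u.add a) t := rfl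
    have h2 : PySem.Set.update (PySem.Set.update s u) (a :: t)
        = PySem.Set.update ((PySem.Set.update s u).add a) t := rfl
    rw [h1, h2, ih, pv_update_add]

theorem pv_update_ofList (s : PySem.Set String) (l : List String) :
    PySem.Set.update s (PySem.Set.ofList l) = PySem.Set.update s l := by
  have h : PySem.Set.ofList l = PySem.Set.update ([] : PySem.Set String) l := rfl
  rw [h, pv_update_update]
  rfl

theorem pv_A_keys (sets : List (PySem.Set String)) (c : PySem.Dict String Int) :
    (sets.foldl (fun c pl => pl.foldl (fun c ln => c.modify ln 0 (· + 1)) c) c).keys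
      = sets.foldl (fun ks s => PySem.Set.update ks s) c.keys := by
  induction sets generalizing c with
  | nil => rfl
  | cons s t ih =>
    simp only [List.foldl_cons]
    rw [ih, PySem.Dict.keys_foldl_modify (f := fun _ _ => (· + 1))]

theorem pv_nodup_fold_update (pages : List (List (String × String)))
    (ks : PySem.Set String) (h : ks.Nodup) :
    (pages.foldl (fun ks p => PySem.Set.update ks (pvLL p)) ks).Nodup := by
  induction pages generalizing ks with
  | nil => exact h
  | cons p t ih => exact ih _ (PySem.Set.nodup_update _ _ h)

-- B's hand-written dedup of one page's lines is Set.update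
theorem pv_dedup_inner (l : List String) (acc : PySem.Set String) :
    l.foldl (fun acc s => if s ∈ acc then acc else acc ++ [s]) acc = PySem.Set.update acc l := by
  induction l generalizing acc with
  | nil => rfl
  | cons a t ih =>
    rw [List.foldl_cons, ih, ← PySem.Set.add_eq_ite, PySem.Set.update_cons]

-- B's per-candidate counting loop is countP
theorem pv_count_foldl {α : Type} (P : α → Prop) [DecidablePred P] (l : List α) (n : Int) :
    l.foldl (fun n x => if P x then n + 1 else n) n
      = n + (l.countP (fun x => decide (P x)) : Int) := by
  induction l generalizing n with
  | nil => simp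
  | cons a t ih =>
    simp only [List.foldl_cons, List.countP_cons, ih]
    by_cases h : P a
    · simp [h]; omega
    · simp [h]

theorem pv_main (pages : List (List (String × String))) (threshold : Int) :
    find_repeated_lines_py pages threshold = find_repeated_lines_py_alt pages threshold := by
  unfold find_repeated_lines_py find_repeated_lines_py_alt
  simp only [pv_dedup_inner,
    show (fun p => List.filter (fun s => s != "") (List.map PySem.Str.strip (pvRawLines p))) = pvLL
      from rfl,
    show (fun p => PySem.Set.ofList (List.filter (fun s => s != "") (List.map PySem.Str.strip (pvRawLines p))))
        = (fun p => PySem.Set.ofList (pvLL p)) from rfl,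
    List.foldl_map]
  set K := pages.foldl (fun ks p => PySem.Set.update ks (pvLL p)) ([] : PySem.Set String) with hK
  set cA := pages.foldl
      (fun c p => (PySem.Set.ofList (pvLL p)).foldl (fun c ln => c.modify ln 0 (· + 1)) c)
      (PySem.Dict.empty : PySem.Dict String Int) with hcA
  have hcA' : cA = (pages.map (fun p => PySem.Set.ofList (pvLL p))).foldl
      (fun c page_line => page_line.foldl (fun c ln => c.modify ln 0 (· + 1)) c)
      PySem.Dict.empty := by rw [List.foldl_map, hcA]
  have hKA : cA.keys = K := by
    rw [hcA', pv_A_keys, List.foldl_map]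
    show (pages.foldl (fun ks p => PySem.Set.update ks (PySem.Set.ofList (pvLL p))) PySem.Dict.empty.keys) = _
    simp only [pv_update_ofList]
    rw [hK]
    rfl
  have hnodup : K.Nodup := hK ▸ pv_nodup_fold_update pages [] List.nodup_nil
  rw [PySem.Dict.items_eq_map_keys cA (hKA ▸ hnodup) 0, hKA,
      List.filter_map, List.map_map]
  congr 1
  simp only [Function.comp_def]
  rw [List.map_id']
  apply List.filter_congr
  intro v hv
  have hA : cA.getD v 0 = (pages.countP (fun p => decide (v ∈ pvLL p)) : Int) := by
    rw [hcA', pv_A_getD _ _ _ (by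
      intro s hs
      simp only [List.mem_map] at hs
      obtain ⟨p, _, rfl⟩ := hs
      exact PySem.Set.nodup_ofList _)]
    rw [List.countP_map]
    simp [PySem.Set.mem_ofList, Function.comp_def]
  rw [hA, pv_count_foldl (P := fun p => v ∈ pvLL p)]
  simp

-- ===== VERDICT (by name: the statement is the Claim_ definition above) =====
theorem find_repeated_lines_py_spec : Claim_equal_find_repeated_lines_py := by
  intro pages threshold _ _
  exact pv_main pages threshold
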